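-- pv_equiv track=rewrite | github.com/Orewek/university | first_year/first_term/string_laba/search_string/search_logic.py | same_letters_find_el
-- ===== SOURCE A (Python) =====
-- from typing import List
--
-- def same_letters_find_el(find_index: list) -> list:
--     """
--     [p, 1] -> separating [i][j] to 2 diff lists
--     if we found p and its already in our list[i]
--     we should take his el from list[j] (so here j == i)
--     so our [p, 4] must change to [p, 1] in total
--     """
--     total_letter: List[list] = []
--     letters_ascii_letter: List[int] = []
--     letters_word_jump: List[int] = []
--     for i in range(len(find_index)):
--         if find_index[i][0] not in letters_ascii_letter:
--             letters_ascii_letter.append(find_index[i][0])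
--             letters_word_jump.append(find_index[i][1])
--             total_letter.append([find_index[i][0], find_index[i][1]])
--         else:
--             for j in range(len(find_index)):
--                 if letters_ascii_letter[j] == find_index[i][0]:
--                     total_letter.append([find_index[i][0], letters_word_jump[j]])
--                     break
--
--     return total_letter
-- ===== SOURCE B (Python) =====
-- def same_letters_find_el(find_index: list) -> list:
--     total = []
--     for row in find_index:
--         for r in find_index:
--             if r[0] == row[0]:
--                 total.append([row[0], r[1]])
--                 break
--     return total
-- ===== Notes on version B (the rewrite author's own statement) =====
-- stated objective: alternative
-- what changed: A's incremental memoization (three parallel seen-lists with a seen/not-seen branch and a scan of the memo for duplicates) is replaced by a stateless brute-force rule: each row's value is the jump of the first row in the original list with the same key, found by scanning the input itself; no accumulator state or branch remains.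
import Mathlib
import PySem

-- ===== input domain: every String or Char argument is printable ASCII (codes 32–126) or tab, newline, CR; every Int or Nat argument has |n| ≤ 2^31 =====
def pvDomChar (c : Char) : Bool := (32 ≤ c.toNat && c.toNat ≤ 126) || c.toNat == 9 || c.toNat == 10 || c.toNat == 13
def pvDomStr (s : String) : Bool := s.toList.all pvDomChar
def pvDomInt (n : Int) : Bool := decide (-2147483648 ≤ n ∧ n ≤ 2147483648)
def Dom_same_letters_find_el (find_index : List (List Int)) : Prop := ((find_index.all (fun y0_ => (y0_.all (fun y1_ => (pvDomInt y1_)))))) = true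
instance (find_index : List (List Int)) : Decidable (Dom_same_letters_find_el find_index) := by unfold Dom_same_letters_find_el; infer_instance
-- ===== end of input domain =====

-- B replaces A's incremental memoization (seen-lists + branch) by a stateless nested scan of
-- the original list: each row's value is the jump of the first row with the same key (alternative).

-- ===== PORT A =====
-- Inner loop 'for j in range(len(find_index)): if letters[j] == key: append [key, jumps[j]]; break'
-- scans letters/jumps in parallel for the first matching index; under Pre_ the key is present,
-- so the scan stops before either list ends (exactly Python's behaviour there).
def pvScanA (key : Int) : List Int → List Int → Option Int
  | [], _ => none
  | _ :: _, [] => none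
  | l :: ls, j :: js => if l = key then some j else pvScanA key ls js

-- find_index[i][0] / [i][1] are pyGetD …; exact under Pre_ (rows where Python raises IndexError excluded).
def pvLoopA : List (List Int) → List (List Int) → List Int → List Int → List (List Int)
  | [], total, _, _ => total
  | row :: rest, total, letters, jumps =>
    let k := PySem.List.pyGetD row 0 0
    if k ∉ letters then
      pvLoopA rest (total ++ [[k, PySem.List.pyGetD row 1 0]])
        (letters ++ [k]) (jumps ++ [PySem.List.pyGetD row 1 0])
    else
      match pvScanA k letters jumps with
      | some j => pvLoopA rest (total ++ [[k, j]]) letters jumps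
      | none => pvLoopA rest total letters jumps  -- unreachable: k ∈ letters, letters/jumps same length

def same_letters_find_el (find_index : List (List Int)) : List (List Int) :=
  pvLoopA find_index [] [] []

-- ===== PORT B =====
-- Inner loop 'for r in find_index: if r[0] == row[0]: append; break': first row of the ORIGINAL
-- list whose key equals the current row's key (r[0]/r[1] are pyGetD; exact under Pre_).
def pvScanB (k : Int) : List (List Int) → Option Int
  | [] => none
  | r :: rs =>
    if PySem.List.pyGetD r 0 0 = k then some (PySem.List.pyGetD r 1 0) else pvScanB k rs

def same_letters_find_el_alt (find_index : List (List Int)) : List (List Int) :=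
  find_index.foldl
    (fun total row =>
      match pvScanB (PySem.List.pyGetD row 0 0) find_index with
      | some j => total ++ [[PySem.List.pyGetD row 0 0, j]]
      | none => total)  -- unreachable: row itself is in find_index, so the scan finds a match
    []

-- ===== PRECONDITION & SPEC =====
-- Pre_ excludes exactly the inputs on which Python A raises IndexError: an empty row, or a
-- length-1 row whose key has no earlier occurrence (then find_index[i][0] resp. [i][1] raises).
def Pre_same_letters_find_el (find_index : List (List Int)) : Prop :=
  ∀ i < find_index.length, find_index.getD i [] ≠ [] ∧
    ((find_index.getD i []).length = 1 →
      ∃ j < i, (find_index.getD j []).headI = (find_index.getD i []).headI)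
instance (find_index : List (List Int)) : Decidable (Pre_same_letters_find_el find_index) := by
  unfold Pre_same_letters_find_el; infer_instance

def pvWitness_same_letters_find_el : List (List Int) := [[1, 2], [1], [3, 4]]

def Spec_same_letters_find_el (find_index : List (List Int)) (out : List (List Int)) : Prop := out = same_letters_find_el_alt find_index
instance (find_index : List (List Int)) (out : List (List Int)) : Decidable (Spec_same_letters_find_el find_index out) := by unfold Spec_same_letters_find_el; infer_instance

-- ===== CLAIM (what is proved, stated in full; the proofs are below) =====
def Claim_equal_same_letters_find_el : Prop := ∀ (find_index : List (List Int)), Dom_same_letters_find_el find_index → Pre_same_letters_find_el find_index → Spec_same_letters_find_el find_index (same_letters_find_el find_index)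

-- ===== LEMMAS AND PROOFS =====

-- First-occurrence table of a list of rows, as a dict built left to right (proof device linking
-- A's growing letters/jumps state to B's scan of the whole list).
def pvExtend (d : PySem.Dict Int Int) (l : List (List Int)) : PySem.Dict Int Int :=
  l.foldl
    (fun d row =>
      if d.contains (PySem.List.pyGetD row 0 0) = false then
        d.insert (PySem.List.pyGetD row 0 0) (PySem.List.pyGetD row 1 0)
      else d) d

lemma pvExtend_cons (d : PySem.Dict Int Int) (row : List Int) (rest : List (List Int)) :
    pvExtend d (row :: rest) =
      pvExtend (if d.contains (PySem.List.pyGetD row 0 0) = false then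
          d.insert (PySem.List.pyGetD row 0 0) (PySem.List.pyGetD row 1 0)
        else d) rest := rfl

lemma pvExtend_get? (l : List (List Int)) (d : PySem.Dict Int Int) (k : Int)
    (h : d.contains k = true) : (pvExtend d l).get? k = d.get? k := by
  induction l generalizing d with
  | nil => rfl
  | cons row rest ih =>
    rw [pvExtend_cons]
    split_ifs with hc
    · have hne : k ≠ PySem.List.pyGetD row 0 0 := by
        intro he; rw [he] at h; rw [h] at hc; cases hc
      rw [ih _ (by simp [PySem.Dict.contains_insert, h]),
        PySem.Dict.get?_insert_of_ne _ _ hne]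
    · exact ih _ h

lemma pvZip_contains (letters jumps : List Int) (k : Int)
    (h : letters.length = jumps.length) :
    (PySem.Dict.mk (letters.zip jumps)).contains k = decide (k ∈ letters) := by
  induction letters generalizing jumps with
  | nil => simp [PySem.Dict.contains_mk]
  | cons l ls ih =>
    cases jumps with
    | nil => simp at h
    | cons j js =>
      simp only [List.length_cons, Nat.add_right_cancel_iff] at h
      by_cases he : l = k
      · simp [PySem.Dict.contains_mk, he]
      · have := ih js h
        simp only [PySem.Dict.contains_mk] at this ⊢
        simp [this, he, Ne.symm he]

lemma pvZip_scan (letters jumps : List Int) (k : Int)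
    (h : letters.length = jumps.length) :
    pvScanA k letters jumps = (PySem.Dict.mk (letters.zip jumps)).get? k := by
  induction letters generalizing jumps with
  | nil => simp [pvScanA]; rfl
  | cons l ls ih =>
    cases jumps with
    | nil => simp at h
    | cons j js =>
      simp only [List.length_cons, Nat.add_right_cancel_iff] at h
      simp only [pvScanA, List.zip_cons_cons, PySem.Dict.get?_mk_cons, beq_iff_eq]
      by_cases he : l = k <;> simp [he, ih js h]

-- A's loop unrolled: it produces, for each remaining row, the first-occurrence table's value.
lemma pvLoopA_eq (rest : List (List Int)) :
    ∀ (total : List (List Int)) (letters jumps : List Int),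
      letters.length = jumps.length →
      pvLoopA rest total letters jumps =
        total ++ rest.map (fun r =>
          [PySem.List.pyGetD r 0 0,
           (pvExtend (PySem.Dict.mk (letters.zip jumps)) rest).getD (PySem.List.pyGetD r 0 0) 0]) := by
  induction rest with
  | nil => intro total letters jumps _; simp [pvLoopA]
  | cons row rest ih =>
    intro total letters jumps hlen
    set k := PySem.List.pyGetD row 0 0 with hk
    set v := PySem.List.pyGetD row 1 0 with hv
    have hstep : pvExtend (PySem.Dict.mk (letters.zip jumps)) (row :: rest) =
        pvExtend (if (PySem.Dict.mk (letters.zip jumps)).contains k = false then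
            (PySem.Dict.mk (letters.zip jumps)).insert k v
          else PySem.Dict.mk (letters.zip jumps)) rest := by
      rw [pvExtend_cons, ← hk, ← hv]
    by_cases hmem : k ∈ letters
    · -- duplicate key: A's inner scan finds the stored jump; table unchanged
      have hcont : (PySem.Dict.mk (letters.zip jumps)).contains k = true := by
        rw [pvZip_contains _ _ _ hlen]; simpa
      obtain ⟨j, hj⟩ : ∃ j, (PySem.Dict.mk (letters.zip jumps)).get? k = some j := by
        have := PySem.Dict.contains_eq_isSome_get? (d := PySem.Dict.mk (letters.zip jumps)) (k := k)
        rw [this] at hcont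
        exact Option.isSome_iff_exists.mp hcont
      have hscan : pvScanA k letters jumps = some j := by rw [pvZip_scan _ _ _ hlen, hj]
      have hlookup : (pvExtend (PySem.Dict.mk (letters.zip jumps)) (row :: rest)).getD k 0 = j := by
        rw [hstep]; simp only [hcont, Bool.true_eq_false, if_false]
        rw [PySem.Dict.getD_eq_get?_getD, pvExtend_get? _ _ _ hcont, hj]; rfl
      simp only [pvLoopA, ← hk, hmem, not_true_eq_false, if_false, hscan]
      rw [ih (total ++ [[k, j]]) letters jumps hlen, List.map_cons, hlookup]
      rw [hstep]; simp only [hcont, Bool.true_eq_false, if_false]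
      simp
      exact hk
    · -- new key: A appends to all three lists; the table gains the pair
      have hcont : (PySem.Dict.mk (letters.zip jumps)).contains k = false := by
        rw [pvZip_contains _ _ _ hlen]; simpa
      have hins : PySem.Dict.mk ((letters ++ [k]).zip (jumps ++ [v])) =
          (PySem.Dict.mk (letters.zip jumps)).insert k v := by
        apply PySem.Dict.ext
        rw [PySem.Dict.items_insert_of_not_contains _ _ hcont]
        show (letters ++ [k]).zip (jumps ++ [v]) = letters.zip jumps ++ [(k, v)]
        rw [List.zip_append hlen]; rfl
      have hd : pvExtend (PySem.Dict.mk (letters.zip jumps)) (row :: rest) =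
          pvExtend (PySem.Dict.mk ((letters ++ [k]).zip (jumps ++ [v]))) rest := by
        rw [hstep, hins]; simp [hcont]
      have hcont' : ((PySem.Dict.mk (letters.zip jumps)).insert k v).contains k = true :=
        PySem.Dict.contains_insert_self _ _ _
      have hlookup : (pvExtend (PySem.Dict.mk (letters.zip jumps)) (row :: rest)).getD k 0 = v := by
        rw [hd, hins, PySem.Dict.getD_eq_get?_getD, pvExtend_get? _ _ _ hcont',
          PySem.Dict.get?_insert_self]; rfl
      simp only [pvLoopA, ← hk, ← hv, hmem, not_false_eq_true, if_true]
      rw [ih (total ++ [[k, v]]) (letters ++ [k]) (jumps ++ [v]) (by simp [hlen]),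
        List.map_cons, hlookup, hd]
      simp
      exact hk

-- The first-occurrence table looks up exactly what B's scan of the list finds.
lemma pvExtend_get?_or (l : List (List Int)) (d : PySem.Dict Int Int) (k : Int) :
    (pvExtend d l).get? k = (d.get? k).or (pvScanB k l) := by
  induction l generalizing d with
  | nil => simp [pvExtend, pvScanB]
  | cons row rest ih =>
    rw [pvExtend_cons]
    by_cases he : PySem.List.pyGetD row 0 0 = k
    · by_cases hc : d.contains k = true
      · have hs : (d.get? k).isSome := by
          rw [← PySem.Dict.contains_eq_isSome_get?]; exact hc
        obtain ⟨j, hj⟩ := Option.isSome_iff_exists.mp hs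
        simp only [he, hc, Bool.true_eq_false, if_false]
        rw [ih, hj]; simp [pvScanB, he]
      · have hc' : d.contains (PySem.List.pyGetD row 0 0) = false := by
          rw [he]; simpa using hc
        simp only [hc', if_true]
        rw [ih, he, PySem.Dict.get?_insert_self]
        have hnone : d.get? k = none := by
          have := PySem.Dict.contains_eq_isSome_get? (d := d) (k := k)
          simp only [hc] at this
          exact Option.not_isSome_iff_eq_none.mp (by simp [← this])
        simp [pvScanB, he, hnone]
    · have hskip : pvScanB k (row :: rest) = pvScanB k rest := by simp [pvScanB, he]
      split_ifs with hc
      · rw [ih, hskip, PySem.Dict.get?_insert_of_ne _ _ (Ne.symm he)]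
      · rw [ih, hskip]

lemma pvScanB_isSome (fi : List (List Int)) (row : List Int) (hm : row ∈ fi) :
    (pvScanB (PySem.List.pyGetD row 0 0) fi).isSome := by
  induction fi with
  | nil => cases hm
  | cons r rs ih =>
    by_cases he : PySem.List.pyGetD r 0 0 = PySem.List.pyGetD row 0 0
    · simp [pvScanB, he]
    · rcases List.mem_cons.mp hm with h | h
      · exact absurd (by rw [h]) he
      · simpa [pvScanB, he] using ih h

-- B's fold unrolled into a map (every scan succeeds, so the none branch never fires).
lemma pvFoldB_eq (fi : List (List Int)) (l : List (List Int))
    (hsub : ∀ row ∈ l, row ∈ fi) :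
    ∀ total, l.foldl
        (fun total row =>
          match pvScanB (PySem.List.pyGetD row 0 0) fi with
          | some j => total ++ [[PySem.List.pyGetD row 0 0, j]]
          | none => total) total =
      total ++ l.map (fun row =>
        [PySem.List.pyGetD row 0 0, (pvScanB (PySem.List.pyGetD row 0 0) fi).getD 0]) := by
  induction l with
  | nil => intro total; simp
  | cons row rest ih =>
    intro total
    obtain ⟨j, hj⟩ := Option.isSome_iff_exists.mp
      (pvScanB_isSome fi row (hsub row (List.mem_cons_self)))
    simp only [List.foldl_cons, hj, List.map_cons]
    rw [ih (fun r hr => hsub r (List.mem_cons_of_mem _ hr)), List.append_assoc]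
    rfl

-- ===== VERDICT (by name: the statement is the Claim_ definition above) =====
theorem same_letters_find_el_spec : Claim_equal_same_letters_find_el := by
  intro fi _ _
  show same_letters_find_el fi = same_letters_find_el_alt fi
  rw [same_letters_find_el, pvLoopA_eq fi [] [] [] rfl,
    same_letters_find_el_alt, pvFoldB_eq fi fi (fun _ h => h) []]
  simp only [List.nil_append]
  apply List.map_congr_left
  intro r _
  rw [PySem.Dict.getD_eq_get?_getD, pvExtend_get?_or]
  rfl
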